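-- pv_equiv track=rewrite | github.com/POOIKL/Project | Online_objname2/Mylibrary.py | InfoExtract
-- ===== SOURCE A (Python) =====
-- def InfoExtract(UnionInfo):
--     Info = []
--     UnionInfo = sorted(UnionInfo)
--     Info.append(UnionInfo[0])
--     UnionInfo.pop(0)
--     for i in UnionInfo:
--         if len(i) <= 8:
--             Info.append(i)
--     for i in UnionInfo:
--         if i not in Info:
--             Info.append(i)
--     return Info
-- ===== SOURCE B (Python) =====
-- def InfoExtract(UnionInfo):
--     s = sorted(UnionInfo)
--     first = s[0]
--     shorts, longs = [], []
--     for i in s[1:]: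
--         if len(i) <= 8:
--             shorts.append(i)
--         elif i != first and i not in longs:
--             longs.append(i)
--     return [first] + shorts + longs
-- ===== Notes on version B (the rewrite author's own statement) =====
-- stated objective: faster
-- what changed: Replaces A's two full scans over the sorted tail (shorts pass, then a dedup pass whose 'i not in Info' scans the entire growing result) by a single partitioning pass whose membership test scans only the small deduplicated longs list.
import Mathlib
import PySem

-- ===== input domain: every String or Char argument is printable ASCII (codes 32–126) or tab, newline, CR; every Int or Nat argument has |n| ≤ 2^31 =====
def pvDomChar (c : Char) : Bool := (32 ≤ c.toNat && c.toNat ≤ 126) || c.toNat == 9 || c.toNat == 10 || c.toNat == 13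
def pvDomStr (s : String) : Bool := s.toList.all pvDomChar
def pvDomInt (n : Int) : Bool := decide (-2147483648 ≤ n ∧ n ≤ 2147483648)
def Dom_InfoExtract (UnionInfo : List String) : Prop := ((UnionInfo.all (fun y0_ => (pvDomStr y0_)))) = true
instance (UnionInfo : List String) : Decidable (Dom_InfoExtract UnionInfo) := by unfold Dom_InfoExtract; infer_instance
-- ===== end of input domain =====

-- B replaces A's two full scans of the sorted tail by one partitioning pass; return values only (A rebinds its parameter locally, no caller-visible mutation).

-- ===== PORT A =====
def InfoExtract (UnionInfo : List String) : List String :=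
  let s := PySem.List.sorted UnionInfo (fun x => x) false
  match s with
  | [] => []          -- Python raises IndexError on UnionInfo[0]; excluded by Pre_
  | first :: rest =>  -- Info.append(UnionInfo[0]); UnionInfo.pop(0)
    let info := rest.foldl (fun acc i => if PySem.Str.len i ≤ 8 then acc ++ [i] else acc) [first]
    rest.foldl (fun acc i => if i ∈ acc then acc else acc ++ [i]) info

-- ===== PORT B =====
def InfoExtract_alt (UnionInfo : List String) : List String :=
  let s := PySem.List.sorted UnionInfo (fun x => x) false
  match s with
  | [] => []          -- Python raises IndexError on s[0]; excluded by Pre_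
  | first :: rest =>
    let p := rest.foldl (fun (p : List String × List String) i =>
      if PySem.Str.len i ≤ 8 then (p.1 ++ [i], p.2)
      else if i ≠ first ∧ i ∉ p.2 then (p.1, p.2 ++ [i]) else p) ([], [])
    first :: (p.1 ++ p.2)

-- ===== PRECONDITION & SPEC =====
-- A raises IndexError on the empty list (UnionInfo[0]); B raises there too.
def Pre_InfoExtract (UnionInfo : List String) : Prop := UnionInfo ≠ []
instance (UnionInfo : List String) : Decidable (Pre_InfoExtract UnionInfo) := by unfold Pre_InfoExtract; infer_instance
def pvWitness_InfoExtract : List String := ["a"]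
def Spec_InfoExtract (UnionInfo : List String) (out : List String) : Prop := out = InfoExtract_alt UnionInfo
instance (UnionInfo : List String) (out : List String) : Decidable (Spec_InfoExtract UnionInfo out) := by unfold Spec_InfoExtract; infer_instance

-- ===== CLAIM (what is proved, stated in full; the proofs are below) =====
def Claim_equal_InfoExtract : Prop := ∀ (UnionInfo : List String), Dom_InfoExtract UnionInfo → Pre_InfoExtract UnionInfo → Spec_InfoExtract UnionInfo (InfoExtract UnionInfo)

-- ===== LEMMAS AND PROOFS =====

-- B's pair fold splits into the shorts filter and a dedup fold over the longs.
lemma pvPairFold (first : String) (l sa la : List String) :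
    (l.foldl (fun (p : List String × List String) i =>
      if PySem.Str.len i ≤ 8 then (p.1 ++ [i], p.2)
      else if i ≠ first ∧ i ∉ p.2 then (p.1, p.2 ++ [i]) else p) (sa, la))
    = (sa ++ l.filter (fun i => decide (PySem.Str.len i ≤ 8)),
       l.foldl (fun acc i => if PySem.Str.len i ≤ 8 then acc
                 else if i ≠ first ∧ i ∉ acc then acc ++ [i] else acc) la) := by
  induction l generalizing sa la with
  | nil => simp
  | cons x xs ih =>
    by_cases hx : PySem.Str.len x ≤ 8
    · rw [List.foldl_cons, if_pos hx, ih, List.filter_cons_of_pos (by simpa using hx),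
        List.foldl_cons, if_pos hx]
      simp
    · by_cases hc : x ≠ first ∧ x ∉ la
      · rw [List.foldl_cons, if_neg hx, if_pos hc, ih,
          List.filter_cons_of_neg (by simpa using hx), List.foldl_cons, if_neg hx, if_pos hc]
      · rw [List.foldl_cons, if_neg hx, if_neg hc, ih,
          List.filter_cons_of_neg (by simpa using hx), List.foldl_cons, if_neg hx, if_neg hc]

-- A's second loop over (first :: shorts) ++ acc acts as B's dedup of longs.
lemma pvLoop2 (first : String) (shorts : List String)
    (hs : ∀ i ∈ shorts, PySem.Str.len i ≤ 8) (l : List String)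
    (hl : ∀ i ∈ l, PySem.Str.len i ≤ 8 → i ∈ shorts) (acc : List String) :
    l.foldl (fun acc i => if i ∈ acc then acc else acc ++ [i]) ((first :: shorts) ++ acc)
    = (first :: shorts) ++ l.foldl (fun acc i => if PySem.Str.len i ≤ 8 then acc
        else if i ≠ first ∧ i ∉ acc then acc ++ [i] else acc) acc := by
  induction l generalizing acc with
  | nil => rfl
  | cons x xs ih =>
    have hxs : ∀ i ∈ xs, PySem.Str.len i ≤ 8 → i ∈ shorts := fun i hi => hl i (by simp [hi])
    by_cases hx : PySem.Str.len x ≤ 8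
    · have hmem : x ∈ (first :: shorts) ++ acc := by
        have : x ∈ shorts := hl x (by simp) hx
        simp [this]
      simp only [List.foldl_cons, if_pos hmem, if_pos hx]
      exact ih hxs acc
    · by_cases hc : x ≠ first ∧ x ∉ acc
      · have hnmem : x ∉ (first :: shorts) ++ acc := by
          intro h
          rcases List.mem_append.mp h with h1 | h2
          · rcases List.mem_cons.mp h1 with h1' | hxsh
            · exact hc.1 h1'
            · exact hx (hs x hxsh)
          · exact hc.2 h2
        simp only [List.foldl_cons, if_neg hnmem, if_neg hx, if_pos hc]
        rw [List.append_assoc]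
        exact ih hxs (acc ++ [x])
      · have hmem : x ∈ (first :: shorts) ++ acc := by
          by_cases hxf : x = first
          · exact List.mem_append_left _ (by simp [hxf])
          · exact List.mem_append_right _ (by_contra fun h => hc ⟨hxf, h⟩)
        simp only [List.foldl_cons, if_pos hmem, if_neg hx, if_neg hc]
        exact ih hxs acc

-- ===== VERDICT (by name: the statement is the Claim_ definition above) =====
theorem InfoExtract_spec : Claim_equal_InfoExtract := by
  intro UnionInfo _ _
  unfold Spec_InfoExtract InfoExtract InfoExtract_alt
  cases hs : PySem.List.sorted UnionInfo (fun x => x) false with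
  | nil => rfl
  | cons first rest =>
    simp only
    rw [pvPairFold, PySem.List.foldl_append_ite_eq_filter]
    have hfil : ∀ i ∈ rest.filter (fun i => decide (PySem.Str.len i ≤ 8)), PySem.Str.len i ≤ 8 := by
      intro i hi
      simpa using (List.mem_filter.mp hi).2
    have hl : ∀ i ∈ rest, PySem.Str.len i ≤ 8 → i ∈ rest.filter (fun i => decide (PySem.Str.len i ≤ 8)) := by
      intro i hi h8
      exact List.mem_filter.mpr ⟨hi, by simpa using h8⟩
    have := pvLoop2 first (rest.filter (fun i => decide (PySem.Str.len i ≤ 8))) hfil rest hl []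
    simpa using this
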